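-- pv_equiv track=rewrite | github.com/pypi-data/pypi-mirror-351 | packages/kddl/kddl-0.0.2.tar.gz/kddl-0.0.2/src/kddl/datasets.py | slice_to_cum_len
-- ===== SOURCE A (Python) =====
-- from typing import Sequence, Literal, Tuple
--
-- def slice_to_cum_len(
--     seqs, length, how: Literal["exact", "under", "over"] = "exact"
-- ):
--     """Slice a list of sequences to a cumulative length.
--
--     The `how` parameter determines whether the last sequence is cut to match the target
--     length, or whether it is dropped (under) or included in full (over).
--     """
--     if len(seqs) == 0:
--         return []
--     cum_len = 0
--     for i, seq in enumerate(seqs):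
--         cum_len += len(seq)
--         if cum_len >= length:
--             break
--     assert i is not None
--     if cum_len < length:
--         raise ValueError(f"Not enough data to reach length {length}.")
--     if how == "over":
--         res = seqs[: i + 1]
--     elif how == "exact":
--         res = seqs[: i + 1]
--         res[-1] = res[-1][: length - cum_len]
--     elif how == "under":
--         res = seqs[:i]
--     else:
--         raise ValueError(f"Invalid value for how: {how}")
--     return res
-- ===== SOURCE B (Python) =====
-- def slice_to_cum_len(seqs, length, how="exact"):
--     """Prefix-sum table + binary search for the cut index (instead of A's linear break-loop)."""
--     if not seqs:
--         return []
--     prefix = []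
--     total = 0
--     for s in seqs:
--         total += len(s)
--         prefix.append(total)
--     if prefix[-1] < length:
--         raise ValueError(f"Not enough data to reach length {length}.")
--     # binary search: first index i with prefix[i] >= length (prefix is nondecreasing)
--     lo, hi = 0, len(prefix) - 1
--     while lo < hi:
--         mid = (lo + hi) // 2
--         if prefix[mid] >= length:
--             hi = mid
--         else:
--             lo = mid + 1
--     i = lo
--     cum_len = prefix[i]
--     if how == "over":
--         return seqs[: i + 1]
--     elif how == "exact":
--         res = seqs[: i + 1]
--         res[-1] = res[-1][: length - cum_len]
--         return res
--     elif how == "under":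
--         return seqs[:i]
--     else:
--         raise ValueError(f"Invalid value for how: {how}")
-- ===== Notes on version B (the rewrite author's own statement) =====
-- stated objective: alternative
-- what changed: Replaces A's single accumulate-and-break loop by a materialized prefix-sum table followed by a binary search for the first index whose cumulative length reaches the target.
import Mathlib
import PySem

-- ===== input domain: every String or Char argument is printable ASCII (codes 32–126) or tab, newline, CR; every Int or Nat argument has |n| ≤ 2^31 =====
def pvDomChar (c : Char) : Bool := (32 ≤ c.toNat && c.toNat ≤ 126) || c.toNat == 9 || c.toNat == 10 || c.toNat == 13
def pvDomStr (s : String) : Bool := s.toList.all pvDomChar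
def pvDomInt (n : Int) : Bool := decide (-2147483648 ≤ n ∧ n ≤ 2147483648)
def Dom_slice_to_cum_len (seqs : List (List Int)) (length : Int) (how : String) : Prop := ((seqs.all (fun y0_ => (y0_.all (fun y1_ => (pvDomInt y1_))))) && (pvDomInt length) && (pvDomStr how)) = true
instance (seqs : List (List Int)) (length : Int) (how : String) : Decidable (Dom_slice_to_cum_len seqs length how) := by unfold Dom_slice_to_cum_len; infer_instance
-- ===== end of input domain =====

-- B re-implements A's linear break-loop by a materialized prefix-sum table plus a binary
-- search for the cut index (objective: alternative decomposition; return value only).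

-- ===== PORT A =====
-- the for-loop with break: returns Python's (i, cum_len) after the loop
-- ([] case: loop finished without break, Python leaves i at the last index = next_index - 1)
def pvA_loop (length : Int) : List (List Int) → Nat → Int → Nat × Int
  | [], i, c => (i - 1, c)
  | s :: rest, i, c =>
      let c' := c + (s.length : Int)
      if length ≤ c' then (i, c') else pvA_loop length rest (i + 1) c'

def slice_to_cum_len (seqs : List (List Int)) (length : Int) (how : String) : List (List Int) :=
  if seqs.length = 0 then []
  else
    let p := pvA_loop length seqs 0 0
    let i := p.1
    let cum_len := p.2
    if cum_len < length then []   -- raise ValueError: excluded by Pre_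
    else if how = "over" then PySem.List.slice seqs none (some ((i : Int) + 1))
    else if how = "exact" then
      let res := PySem.List.slice seqs none (some ((i : Int) + 1))
      -- res[-1] = res[-1][: length - cum_len]  (res is nonempty here, so [-1] is the last slot)
      res.dropLast ++ [PySem.List.slice (res.getLast?.getD []) none (some (length - cum_len))]
    else if how = "under" then PySem.List.slice seqs none (some (i : Int))
    else []   -- raise ValueError (invalid how): excluded by Pre_

-- ===== PORT B =====
-- prefix table: running cumulative lengths (Source B's first loop)
def pvB_prefix : List (List Int) → Int → List Int
  | [], _ => []
  | s :: rest, t =>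
      let t' := t + (s.length : Int)
      t' :: pvB_prefix rest t'

-- Source B's while-loop binary search; pfx.getD mid 0 renders prefix[mid] (mid is always in range here)
def pvB_bsearch (pfx : List Int) (length : Int) (lo hi : Nat) : Nat :=
  if lo < hi then
    let mid := (lo + hi) / 2
    if length ≤ pfx.getD mid 0 then pvB_bsearch pfx length lo mid
    else pvB_bsearch pfx length (mid + 1) hi
  else lo
  termination_by hi - lo
  decreasing_by all_goals omega

def slice_to_cum_len_alt (seqs : List (List Int)) (length : Int) (how : String) : List (List Int) :=
  if seqs = [] then []
  else
    let pfx := pvB_prefix seqs 0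
    if pfx.getLast?.getD 0 < length then []   -- raise ValueError: excluded by Pre_  (prefix[-1])
    else
      let i := pvB_bsearch pfx length 0 (pfx.length - 1)
      let cum_len := pfx.getD i 0
      if how = "over" then PySem.List.slice seqs none (some ((i : Int) + 1))
      else if how = "exact" then
        let res := PySem.List.slice seqs none (some ((i : Int) + 1))
        res.dropLast ++ [PySem.List.slice (res.getLast?.getD []) none (some (length - cum_len))]
      else if how = "under" then PySem.List.slice seqs none (some (i : Int))
      else []   -- raise ValueError (invalid how): excluded by Pre_

-- ===== PRECONDITION & SPEC =====
-- Pre_ excludes exactly A's two ValueErrors: total data shorter than `length`, and an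
-- invalid `how` (both only reachable when seqs is nonempty).
def Pre_slice_to_cum_len (seqs : List (List Int)) (length : Int) (how : String) : Prop :=
  seqs = [] ∨
    (length ≤ (seqs.map (fun s => (s.length : Int))).sum ∧
      (how = "exact" ∨ how = "under" ∨ how = "over"))
instance (seqs : List (List Int)) (length : Int) (how : String) : Decidable (Pre_slice_to_cum_len seqs length how) := by unfold Pre_slice_to_cum_len; infer_instance

def pvWitness_slice_to_cum_len : List (List Int) × Int × String := ([[1, 2], [3]], 2, "exact")

def Spec_slice_to_cum_len (seqs : List (List Int)) (length : Int) (how : String) (out : List (List Int)) : Prop := out = slice_to_cum_len_alt seqs length how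
instance (seqs : List (List Int)) (length : Int) (how : String) (out : List (List Int)) : Decidable (Spec_slice_to_cum_len seqs length how out) := by unfold Spec_slice_to_cum_len; infer_instance

-- ===== CLAIM (what is proved, stated in full; the proofs are below) =====
def Claim_equal_slice_to_cum_len : Prop := ∀ (seqs : List (List Int)) (length : Int) (how : String), Dom_slice_to_cum_len seqs length how → Pre_slice_to_cum_len seqs length how → Spec_slice_to_cum_len seqs length how (slice_to_cum_len seqs length how)

-- ===== LEMMAS AND PROOFS =====

theorem pv_take_sum_nonneg (l : List (List Int)) (n : Nat) :
    (0 : Int) ≤ ((l.take n).map (fun s => (s.length : Int))).sum := by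
  induction l generalizing n with
  | nil => simp
  | cons a t ih =>
      cases n with
      | zero => simp
      | succ n =>
          simp only [List.take_succ_cons, List.map_cons, List.sum_cons]
          have := ih n
          positivity

theorem pv_take_sum_mono (l : List (List Int)) (m n : Nat) (h : m ≤ n) :
    ((l.take m).map (fun s => (s.length : Int))).sum ≤
      ((l.take n).map (fun s => (s.length : Int))).sum := by
  induction l generalizing m n with
  | nil => simp
  | cons a t ih =>
      cases m with
      | zero =>
          simp only [List.take_zero, List.map_nil, List.sum_nil]
          cases n with
          | zero => simp
          | succ n =>
              simp only [List.take_succ_cons, List.map_cons, List.sum_cons]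
              have := pv_take_sum_nonneg t n
              positivity
      | succ m =>
          cases n with
          | zero => omega
          | succ n =>
              simp only [List.take_succ_cons, List.map_cons, List.sum_cons]
              have := ih m n (by omega)
              omega

-- entry j of the prefix table
theorem pvB_prefix_getD (seqs : List (List Int)) (c : Int) (j : Nat) (hj : j < seqs.length) :
    (pvB_prefix seqs c).getD j 0 = c + ((seqs.take (j + 1)).map (fun s => (s.length : Int))).sum := by
  induction seqs generalizing c j with
  | nil => simp at hj
  | cons s rest ih =>
      cases j with
      | zero => simp [pvB_prefix]
      | succ j =>
          simp only [pvB_prefix, List.getD_cons_succ, List.take_succ_cons, List.map_cons,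
            List.sum_cons]
          rw [ih _ _ (by simpa using hj)]
          ring

theorem pvB_prefix_length (seqs : List (List Int)) (c : Int) :
    (pvB_prefix seqs c).length = seqs.length := by
  induction seqs generalizing c with
  | nil => simp [pvB_prefix]
  | cons s rest ih => simp [pvB_prefix, ih]

theorem pvB_prefix_mono (seqs : List (List Int)) (c : Int) (j k : Nat) (hjk : j ≤ k)
    (hk : k < seqs.length) :
    (pvB_prefix seqs c).getD j 0 ≤ (pvB_prefix seqs c).getD k 0 := by
  rw [pvB_prefix_getD seqs c j (lt_of_le_of_lt hjk hk), pvB_prefix_getD seqs c k hk]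
  have := pv_take_sum_mono seqs (j + 1) (k + 1) (by omega)
  omega

-- any getD of a nonempty list's getLast? ignores the default
theorem pv_getLast?_getD_irrel (x : Int) (l : List Int) (c d : Int) :
    (x :: l).getLast?.getD c = (x :: l).getLast?.getD d := by
  rw [List.getLast?_cons]; simp

theorem pvB_prefix_getLast (seqs : List (List Int)) (c : Int) (h : seqs ≠ []) :
    (pvB_prefix seqs c).getLast?.getD c =
      c + (seqs.map (fun s => (s.length : Int))).sum := by
  induction seqs generalizing c with
  | nil => exact absurd rfl h
  | cons s rest ih =>
      cases rest with
      | nil => simp [pvB_prefix]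
      | cons a t =>
          simp only [pvB_prefix, List.map_cons, List.sum_cons, List.getLast?_cons_cons]
          have := ih (c := c + (s.length : Int)) (by simp)
          simp only [pvB_prefix, List.map_cons, List.sum_cons] at this
          rw [pv_getLast?_getD_irrel _ _ c (c + (s.length : Int)), this]; ring

-- first-hit characterisation of A's break-loop via the prefix table
theorem pvA_loop_eq (length : Int) (seqs : List (List Int)) (i : Nat) (c : Int) :
    pvA_loop length seqs i c =
      match (pvB_prefix seqs c).findIdx? (fun p => length ≤ p) with
      | some j => (i + j, (pvB_prefix seqs c).getD j 0)
      | none => (i + seqs.length - 1, (pvB_prefix seqs c).getLast?.getD c) := by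
  induction seqs generalizing i c with
  | nil => simp [pvA_loop, pvB_prefix]
  | cons s rest ih =>
      simp only [pvA_loop, pvB_prefix, List.findIdx?_cons]
      by_cases h : length ≤ c + (s.length : Int)
      · simp [h]
      · simp only [h, decide_false, Bool.false_eq_true, if_false]
        rw [ih]
        rcases hf : (pvB_prefix rest (c + (s.length : Int))).findIdx? (fun p => length ≤ p) with
          _ | j
        · simp only [Option.map_none]
          cases rest with
          | nil => simp [pvB_prefix]
          | cons a t =>
              refine Prod.ext ?_ ?_
              · simp; omega
              · show (pvB_prefix (a :: t) (c + (s.length : Int))).getLast?.getD (c + (s.length : Int)) =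
                  ((c + (s.length : Int)) :: pvB_prefix (a :: t) (c + (s.length : Int))).getLast?.getD c
                simp only [pvB_prefix, List.getLast?_cons_cons]
                exact (pv_getLast?_getD_irrel _ _ _ _)
        · simp only [Option.map_some]
          refine Prod.ext ?_ ?_
          · show i + 1 + j = i + (j + 1); omega
          · show (pvB_prefix rest (c + (s.length : Int))).getD j 0 =
              ((c + (s.length : Int)) :: pvB_prefix rest (c + (s.length : Int))).getD (j + 1) 0
            rw [List.getD_cons_succ]

-- the binary search returns the first index whose prefix entry reaches `length`
theorem pvB_bsearch_spec (pfx : List Int) (length : Int)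
    (mono : ∀ j k, j ≤ k → k < pfx.length → pfx.getD j 0 ≤ pfx.getD k 0) :
    ∀ n lo hi, hi - lo ≤ n → lo ≤ hi → hi < pfx.length →
      (∀ k, k < lo → pfx.getD k 0 < length) → length ≤ pfx.getD hi 0 →
      lo ≤ pvB_bsearch pfx length lo hi ∧ pvB_bsearch pfx length lo hi ≤ hi ∧
        length ≤ pfx.getD (pvB_bsearch pfx length lo hi) 0 ∧
        (∀ k, k < pvB_bsearch pfx length lo hi → pfx.getD k 0 < length) := by
  intro n
  induction n with
  | zero =>
      intro lo hi hfuel hle hlen hlo hhi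
      have : lo = hi := by omega
      subst this
      rw [pvB_bsearch]
      simp only [lt_irrefl, if_false]
      exact ⟨le_refl _, le_refl _, hhi, hlo⟩
  | succ n ih =>
      intro lo hi hfuel hle hlen hlo hhi
      rw [pvB_bsearch]
      by_cases h : lo < hi
      · simp only [h, if_true]
        by_cases hm : length ≤ pfx.getD ((lo + hi) / 2) 0
        · simp only [hm, if_true]
          have := ih lo ((lo + hi) / 2) (by omega) (by omega) (by omega) hlo hm
          exact ⟨this.1, by omega, this.2.2.1, this.2.2.2⟩
        · simp only [hm, if_false]
          have hlo2 : ∀ k, k < (lo + hi) / 2 + 1 → pfx.getD k 0 < length := by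
            intro k hk
            by_cases hklo : k < lo
            · exact hlo k hklo
            · have := mono k ((lo + hi) / 2) (by omega) (by omega)
              omega
          have := ih ((lo + hi) / 2 + 1) hi (by omega) (by omega) hlen hlo2 hhi
          exact ⟨by omega, this.2.1, this.2.2.1, this.2.2.2⟩
      · simp only [h, if_false]
        have : lo = hi := by omega
        subst this
        exact ⟨le_refl _, le_refl _, hhi, hlo⟩

-- findIdx? gives the same first-hit properties
theorem findIdx?_first (p : Int → Bool) (l : List Int) (j : Nat)
    (h : l.findIdx? p = some j) :
    j < l.length ∧ p (l.getD j 0) = true ∧ ∀ k, k < j → p (l.getD k 0) = false := by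
  induction l generalizing j with
  | nil => simp at h
  | cons a t ih =>
      rw [List.findIdx?_cons] at h
      by_cases ha : p a
      · simp only [ha, if_true, Option.some.injEq] at h
        subst h
        exact ⟨by simp, by simpa using ha, by omega⟩
      · simp only [ha, if_false, Bool.false_eq_true] at h
        rcases Option.map_eq_some_iff.mp h with ⟨j2, hj2, rfl⟩
        obtain ⟨h1, h2, h3⟩ := ih j2 hj2
        refine ⟨by simpa using h1, by simpa using h2, ?_⟩
        intro k hk
        cases k with
        | zero => simpa using ha
        | succ k => simpa using h3 k (by omega)

-- ===== VERDICT (by name: the statement is the Claim_ definition above) =====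
theorem slice_to_cum_len_spec : Claim_equal_slice_to_cum_len := by
  intro seqs length how _ hpre
  unfold Spec_slice_to_cum_len slice_to_cum_len slice_to_cum_len_alt
  rcases hpre with rfl | ⟨htot, _⟩
  · simp
  by_cases hnil : seqs = []
  · subst hnil; simp
  have hlen0 : seqs.length ≠ 0 := by simpa [List.length_eq_zero_iff] using hnil
  simp only [hlen0, if_false, hnil]
  set pfx := pvB_prefix seqs 0 with hpfx
  have hpl : pfx.length = seqs.length := pvB_prefix_length seqs 0
  have hpne : 0 < pfx.length := by omega
  have hlast : pfx.getLast?.getD 0 = (seqs.map (fun s => (s.length : Int))).sum := by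
    simpa using pvB_prefix_getLast seqs 0 hnil
  have hnotlt : ¬ pfx.getLast?.getD 0 < length := by rw [hlast]; omega
  simp only [hnotlt, if_false]
  -- last entry of pfx, as a getD
  have hlastD : pfx.getLast?.getD 0 = pfx.getD (pfx.length - 1) 0 := by
    rw [List.getLast?_eq_getElem?, List.getD_eq_getElem?_getD]
  have hlastGe : length ≤ pfx.getD (pfx.length - 1) 0 := by rw [← hlastD, hlast]; omega
  have mono : ∀ j k, j ≤ k → k < pfx.length → pfx.getD j 0 ≤ pfx.getD k 0 := by
    intro j k hjk hk
    exact pvB_prefix_mono seqs 0 j k hjk (by omega)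
  -- the loop hits some index: findIdx? cannot be none
  rcases hf : pfx.findIdx? (fun p => length ≤ p) with _ | j
  · exfalso
    have hall := List.findIdx?_eq_none_iff.mp hf
    have hmem : pfx.getD (pfx.length - 1) 0 ∈ pfx := by
      rw [List.getD_eq_getElem pfx 0 (by omega)]
      exact List.getElem_mem _
    have := hall _ hmem
    simp at this
    rw [List.getD_eq_getElem?_getD] at hlastGe
    omega
  obtain ⟨hjlt, hjp, hjfirst⟩ := findIdx?_first _ _ _ hf
  simp only [decide_eq_true_eq] at hjp
  -- the binary search returns the same index j
  have hbs := pvB_bsearch_spec pfx length mono (pfx.length - 1) 0 (pfx.length - 1)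
    (le_refl _) (by omega) (by omega) (by omega) hlastGe
  set r := pvB_bsearch pfx length 0 (pfx.length - 1) with hr
  have hrj : r = j := by
    by_contra hne
    rcases Nat.lt_or_ge r j with hlt | hge
    · have h2 := hjfirst r hlt
      simp only [decide_eq_false_iff_not, not_le] at h2
      have := hbs.2.2.1
      omega
    · have hjr : j < r := by omega
      have := hbs.2.2.2 j hjr
      omega
  -- A's loop result
  have hA := pvA_loop_eq length seqs 0 0
  rw [hf] at hA
  simp only [Nat.zero_add] at hA
  rw [hA]
  simp only [← hpfx]
  have hcum : ¬ pfx.getD j 0 < length := by omega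
  rw [if_neg hcum, hrj]
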